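-- pv_equiv track=rewrite | github.com/DiogoM1/MBINF-AASB_Projeto | sequencinator/aln_graph.py | aln_graph
-- ===== SOURCE A (Python) =====
-- def aln_graph(seq_a, seq_b):
--     # http://www.bioinformatics.uni-muenster.de/teaching/courses-2016/bioinf1/download/bioinfo1_3_2016_handouts.pdf
--     # http://profs.scienze.univr.it/~liptak/FundBA/slides/PWAl_inPractice.pdf
--     # http://www.bpc.uni-frankfurt.de/guentert/wiki/images/5/58/121102_PairwiseAlignment.pdf
--     dot_matrix = []
--     seq_a, seq_b = seq_a.upper(), seq_b.upper()
--     for a in range(len(seq_a)):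
--         dot_matrix.append("")
--         for b in range(len(seq_b)):
--             if seq_a[a] == seq_b[b]:
--                 dot_matrix[a] += "*"
--             else:
--                 dot_matrix[a] += "_"
--     return dot_matrix
-- ===== SOURCE B (Python) =====
-- def aln_graph(seq_a, seq_b):
--     sa, sb = seq_a.upper(), seq_b.upper()
--     cache = {}
--     rows = []
--     for c in sa:
--         r = cache.get(c)
--         if r is None:
--             r = ''.join('*' if x == c else '_' for x in sb)
--             cache[c] = r
--         rows.append(r)
--     return rows
-- ===== Notes on version B (the rewrite author's own statement) =====
-- stated objective: faster
-- what changed: Memoizes one match-row per distinct uppercase character of seq_a (computing it once by a single scan of seq_b) and reuses the cached row for every repeated character, instead of re-running the inner comparison loop for every position of seq_a.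
import Mathlib
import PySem

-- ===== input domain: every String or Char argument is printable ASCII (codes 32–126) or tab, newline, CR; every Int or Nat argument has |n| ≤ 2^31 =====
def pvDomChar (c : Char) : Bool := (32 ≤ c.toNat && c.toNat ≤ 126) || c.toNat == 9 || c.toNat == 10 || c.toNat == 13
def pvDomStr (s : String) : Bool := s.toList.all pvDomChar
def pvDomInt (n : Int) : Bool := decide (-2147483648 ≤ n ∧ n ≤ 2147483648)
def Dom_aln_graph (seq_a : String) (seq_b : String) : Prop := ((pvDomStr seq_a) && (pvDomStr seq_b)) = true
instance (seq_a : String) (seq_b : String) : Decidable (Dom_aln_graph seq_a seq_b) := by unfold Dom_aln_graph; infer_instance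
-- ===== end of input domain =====

-- B memoizes one match-row per distinct uppercase character of seq_a and reuses it for repeats, instead of re-running the inner comparison loop per position; a timing run measures the speed claim.


-- ===== PORT A =====
def aln_graph (seq_a : String) (seq_b : String) : List String :=
  let sa := PySem.Chars.upper seq_a.toList
  let sb := PySem.Chars.upper seq_b.toList
  (PySem.List.pyRange 0 (PySem.List.len sa) 1).foldl (fun dm a =>
    dm ++ [String.ofList ((PySem.List.pyRange 0 (PySem.List.len sb) 1).foldl (fun row b =>
      if PySem.List.pyGetD sa a 'A' = PySem.List.pyGetD sb b 'A' then row ++ ['*']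
      else row ++ ['_']) [])]) []

-- ===== PORT B =====
-- cache.get(c) → Dict.get?; the generator-join row build → map then String.ofList
def aln_graph_alt (seq_a : String) (seq_b : String) : List String :=
  let sa := PySem.Chars.upper seq_a.toList
  let sb := PySem.Chars.upper seq_b.toList
  (sa.foldl (fun (st : PySem.Dict Char String × List String) c =>
    match st.1.get? c with
    | some r => (st.1, st.2 ++ [r])
    | none =>
      let r := String.ofList (sb.map (fun x => if x = c then '*' else '_'))
      (st.1.insert c r, st.2 ++ [r])) (PySem.Dict.empty, [])).2

-- ===== PRECONDITION & SPEC =====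
def Spec_aln_graph (seq_a : String) (seq_b : String) (out : List String) : Prop := out = aln_graph_alt seq_a seq_b
instance (seq_a : String) (seq_b : String) (out : List String) : Decidable (Spec_aln_graph seq_a seq_b out) := by unfold Spec_aln_graph; infer_instance

-- ===== CLAIM (what is proved, stated in full; the proofs are below) =====
def Claim_equal_aln_graph : Prop := ∀ (seq_a : String) (seq_b : String), Dom_aln_graph seq_a seq_b → Spec_aln_graph seq_a seq_b (aln_graph seq_a seq_b)

-- ===== LEMMAS AND PROOFS =====

theorem pvRowA (sb : List Char) (c : Char) :
    (PySem.List.pyRange 0 (PySem.List.len sb) 1).foldl (fun row b =>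
      if c = PySem.List.pyGetD sb b 'A' then row ++ ['*'] else row ++ ['_']) []
    = sb.map (fun x => if c = x then '*' else '_') := by
  have h1 : ∀ (row : List Char) (b : Int),
      (if c = PySem.List.pyGetD sb b 'A' then row ++ ['*'] else row ++ ['_'])
      = row ++ [if c = PySem.List.pyGetD sb b 'A' then '*' else '_'] := by
    intro row b; split_ifs <;> rfl
  simp only [h1]
  rw [PySem.List.foldl_append_singleton_eq_map]
  simp only [PySem.List.len_eq]
  rw [show (fun b => if c = PySem.List.pyGetD sb b 'A' then '*' else '_')
      = (fun x => if c = x then '*' else '_') ∘ (fun b => PySem.List.pyGetD sb b 'A') from rfl,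
    ← List.map_map, PySem.List.map_pyGetD_pyRange_zero']
  simp

-- rowFor: the row A (and B, once per distinct character) produces for character c
def pvRowFor (sb : List Char) (c : Char) : String :=
  String.ofList (sb.map (fun x => if c = x then '*' else '_'))

theorem pvAform (seq_a seq_b : String) :
    aln_graph seq_a seq_b
    = (PySem.Chars.upper seq_a.toList).map (pvRowFor (PySem.Chars.upper seq_b.toList)) := by
  unfold aln_graph pvRowFor
  set sa := PySem.Chars.upper seq_a.toList with hsa
  set sb := PySem.Chars.upper seq_b.toList with hsb
  simp only [pvRowA sb]
  rw [PySem.List.foldl_append_singleton_eq_map]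
  simp only [PySem.List.len_eq]
  rw [show (fun a => String.ofList (sb.map (fun x => if PySem.List.pyGetD sa a 'A' = x then '*' else '_')))
      = (fun c => String.ofList (sb.map (fun x => if c = x then '*' else '_'))) ∘ (fun a => PySem.List.pyGetD sa a 'A') from rfl,
    ← List.map_map, PySem.List.map_pyGetD_pyRange_zero']
  simp

-- B's freshly computed row equals pvRowFor (the comparison is written x = c in Source B)
theorem pvRowSwap (sb : List Char) (c : Char) :
    String.ofList (sb.map (fun x => if x = c then '*' else '_')) = pvRowFor sb c := by
  unfold pvRowFor
  congr 1
  apply List.map_congr_left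
  intro x _
  by_cases h : x = c
  · simp [h]
  · simp [h, Ne.symm h]

-- memoization invariant: if every cached row is correct, the fold's output is the map of pvRowFor
theorem pvMemo (sb : List Char) (sa : List Char) (cache : PySem.Dict Char String)
    (acc : List String)
    (hc : ∀ c r, cache.get? c = some r → r = pvRowFor sb c) :
    (sa.foldl (fun (st : PySem.Dict Char String × List String) c =>
      match st.1.get? c with
      | some r => (st.1, st.2 ++ [r])
      | none =>
        let r := String.ofList (sb.map (fun x => if x = c then '*' else '_'))
        (st.1.insert c r, st.2 ++ [r])) (cache, acc)).2
    = acc ++ sa.map (pvRowFor sb) := by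
  induction sa generalizing cache acc with
  | nil => simp
  | cons c sa ih =>
    simp only [List.foldl_cons, List.map_cons]
    cases hget : cache.get? c with
    | some r =>
      have hr : r = pvRowFor sb c := hc c r hget
      rw [show (match some r with
        | some r => (cache, acc ++ [r])
        | none =>
          (cache.insert c (String.ofList (List.map (fun x => if x = c then '*' else '_') sb)),
            acc ++ [String.ofList (List.map (fun x => if x = c then '*' else '_') sb)]))
        = (cache, acc ++ [r]) from rfl]
      rw [ih cache (acc ++ [r]) hc, hr]
      simp
    | none =>
      rw [show (match (none : Option String) with
        | some r => (cache, acc ++ [r])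
        | none =>
          (cache.insert c (String.ofList (List.map (fun x => if x = c then '*' else '_') sb)),
            acc ++ [String.ofList (List.map (fun x => if x = c then '*' else '_') sb)]))
        = (cache.insert c (String.ofList (List.map (fun x => if x = c then '*' else '_') sb)),
            acc ++ [String.ofList (List.map (fun x => if x = c then '*' else '_') sb)]) from rfl]
      rw [ih _ _ (by
        intro c' r' hget'
        rw [PySem.Dict.get?_insert] at hget'
        by_cases h : c' = c
        · simp only [h] at hget'
          simp only [if_true, Option.some.injEq] at hget'
          rw [← hget', pvRowSwap, h]
        · rw [if_neg h] at hget'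
          exact hc c' r' hget')]
      rw [pvRowSwap]
      simp

theorem pvBform (seq_a seq_b : String) :
    aln_graph_alt seq_a seq_b
    = (PySem.Chars.upper seq_a.toList).map (pvRowFor (PySem.Chars.upper seq_b.toList)) := by
  unfold aln_graph_alt
  rw [pvMemo _ _ PySem.Dict.empty [] (by intro c r h; simp [PySem.Dict.get?, PySem.Dict.empty] at h)]
  simp

-- ===== VERDICT (by name: the statement is the Claim_ definition above) =====
theorem aln_graph_spec : Claim_equal_aln_graph := by
  intro seq_a seq_b _
  unfold Spec_aln_graph
  rw [pvAform, pvBform]
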